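-- pv_equiv track=rewrite | github.com/Nickless-cmd/jarvis-v2 | core/services/deep_analyzer.py | _find_first_keyword_line
-- ===== SOURCE A (Python) =====
-- def _find_first_keyword_line(lines: list[str], keywords: set[str]) -> int:
--     if not keywords:
--         return 1 if lines else 0
--     for idx, line in enumerate(lines, start=1):
--         low = line.lower()
--         if any(k in low for k in keywords):
--             return idx
--     return 0
-- ===== SOURCE B (Python) =====
-- def _find_first_keyword_line(lines: list[str], keywords: set[str]) -> int:
--     # Keyword-outer strategy: lowercase the lines once, then for each keyword
--     # find the first matching line index, scanning only below the best index
--     # found so far; the minimum positive index (0 = never found) is returned.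
--     if not keywords:
--         return 1 if lines else 0
--     lows = [line.lower() for line in lines]
--     best = 0
--     for k in keywords:
--         upto = len(lows) if best == 0 else best - 1
--         i = 0
--         for pos in range(upto):
--             if k in lows[pos]:
--                 i = pos + 1
--                 break
--         if i != 0 and (best == 0 or i < best):
--             best = i
--     return best
-- ===== Notes on version B (the rewrite author's own statement) =====
-- stated objective: alternative
-- what changed: B inverts the loop nesting: it lowercases the lines once, then for each keyword finds the first matching line index (scanning only below the best index found so far) and returns the minimum positive index, instead of A's line-outer scan with an any() over keywords per line.
import Mathlib
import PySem

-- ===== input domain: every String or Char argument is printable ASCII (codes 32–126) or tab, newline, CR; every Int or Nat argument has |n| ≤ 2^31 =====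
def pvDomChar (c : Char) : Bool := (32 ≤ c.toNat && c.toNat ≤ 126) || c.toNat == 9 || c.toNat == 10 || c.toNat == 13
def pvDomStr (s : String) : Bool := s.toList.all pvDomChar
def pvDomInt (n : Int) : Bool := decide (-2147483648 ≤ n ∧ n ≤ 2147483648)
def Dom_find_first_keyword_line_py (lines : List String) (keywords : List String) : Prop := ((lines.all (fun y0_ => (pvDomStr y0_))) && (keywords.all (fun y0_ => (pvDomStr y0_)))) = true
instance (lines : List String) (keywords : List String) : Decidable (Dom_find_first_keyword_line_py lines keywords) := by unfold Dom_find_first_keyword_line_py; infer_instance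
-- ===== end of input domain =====

-- ===== PORT A =====
-- B inverts the loop nesting (keyword-outer min-index scan); return values proved equal everywhere.
def pvAuxA (keywords : List String) : List String → Int → Int
  | [], _ => 0
  | l :: rest, idx =>
    let low := PySem.Str.lower l
    if keywords.any (fun k => PySem.Str.isIn k low) then idx else pvAuxA keywords rest (idx + 1)

def find_first_keyword_line_py (lines : List String) (keywords : List String) : Int :=
  if keywords = [] then (if lines = [] then 0 else 1)
  else pvAuxA keywords lines 1

-- ===== PORT B =====
-- first 1-based index (from `i`) of a lowered line containing k, looking at most
-- `upto` further lines; 0 if none (inner for-range/break of Source B)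
def pvFindLineUpto (k : String) : List String → Int → Int → Int
  | [], _, _ => 0
  | low :: rest, i, upto =>
    if upto ≤ 0 then 0
    else if PySem.Str.isIn k low then i else pvFindLineUpto k rest (i + 1) (upto - 1)

-- `if i != 0 and (best == 0 or i < best): best = i`
def pvBetter (best i : Int) : Int :=
  if i ≠ 0 ∧ (best = 0 ∨ i < best) then i else best

def find_first_keyword_line_py_alt (lines : List String) (keywords : List String) : Int :=
  if keywords = [] then (if lines = [] then 0 else 1)
  else
    let lows := lines.map PySem.Str.lower
    keywords.foldl (fun best k =>
      pvBetter best (pvFindLineUpto k lows 1 (if best = 0 then (lows.length : Int) else best - 1))) 0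

-- ===== PRECONDITION & SPEC =====
def Spec_find_first_keyword_line_py (lines : List String) (keywords : List String) (out : Int) : Prop := out = find_first_keyword_line_py_alt lines keywords
instance (lines : List String) (keywords : List String) (out : Int) : Decidable (Spec_find_first_keyword_line_py lines keywords out) := by unfold Spec_find_first_keyword_line_py; infer_instance

-- ===== CLAIM (what is proved, stated in full; the proofs are below) =====
def Claim_equal_find_first_keyword_line_py : Prop := ∀ (lines : List String) (keywords : List String), Dom_find_first_keyword_line_py lines keywords → Spec_find_first_keyword_line_py lines keywords (find_first_keyword_line_py lines keywords)

-- ===== LEMMAS AND PROOFS =====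

-- proof-side helper: the UNBOUNDED first-match scan (both ports are related to it)
def pvFindLine (k : String) : List String → Int → Int
  | [], _ => 0
  | low :: rest, i => if PySem.Str.isIn k low then i else pvFindLine k rest (i + 1)

-- pvFindLine is 0 or at least its start index
theorem pvFindLine_zero_or_ge (k : String) (lows : List String) :
    ∀ s : Int, pvFindLine k lows s = 0 ∨ s ≤ pvFindLine k lows s := by
  induction lows with
  | nil => intro s; left; rfl
  | cons low rest ih =>
    intro s
    simp only [pvFindLine]
    split
    · right; exact le_refl s
    · rcases ih (s + 1) with h | h
      · left; exact h
      · right; omega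

-- folding pvBetter over keywords whose value is 0 keeps the accumulator
theorem foldl_better_all_zero (g : String → Int) (ks : List String) (b : Int)
    (h : ∀ k ∈ ks, g k = 0) :
    ks.foldl (fun best k => pvBetter best (g k)) b = b := by
  induction ks generalizing b with
  | nil => rfl
  | cons k ks ih =>
    simp only [List.foldl_cons]
    rw [h k (by simp), show pvBetter b 0 = b by simp [pvBetter]]
    exact ih b (fun k hk => h k (by simp [hk]))

-- folding pvBetter: if the accumulator and all values are 0 or ≥ s, and s is hit
-- (by the accumulator or by some value), the fold returns s
theorem foldl_better_hits (g : String → Int) (ks : List String) (b s : Int)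
    (hs : 0 < s)
    (hb : b = 0 ∨ s ≤ b)
    (hv : ∀ k ∈ ks, g k = 0 ∨ s ≤ g k)
    (hhit : b = s ∨ ∃ k ∈ ks, g k = s) :
    ks.foldl (fun best k => pvBetter best (g k)) b = s := by
  induction ks generalizing b with
  | nil =>
    rcases hhit with h | ⟨k, hk, _⟩
    · exact h
    · exact absurd hk (by simp)
  | cons k ks ih =>
    simp only [List.foldl_cons]
    have hgk := hv k (by simp)
    have hb' : pvBetter b (g k) = 0 ∨ s ≤ pvBetter b (g k) := by
      unfold pvBetter; split <;> omega
    refine ih (pvBetter b (g k)) hb' (fun k hk => hv k (by simp [hk])) ?_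
    rcases hhit with h | ⟨k', hk', hgk'⟩
    · left; unfold pvBetter; split <;> omega
    · rcases List.mem_cons.mp hk' with rfl | hk'
      · left; unfold pvBetter; split <;> omega
      · right; exact ⟨k', hk', hgk'⟩

-- congruence for the fold when the per-keyword values agree
theorem foldl_better_congr (g h : String → Int) (ks : List String) (b : Int)
    (hgh : ∀ k ∈ ks, g k = h k) :
    ks.foldl (fun best k => pvBetter best (g k)) b
      = ks.foldl (fun best k => pvBetter best (h k)) b := by
  induction ks generalizing b with
  | nil => rfl
  | cons k ks ih =>
    simp only [List.foldl_cons, hgh k (by simp)]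
    exact ih _ (fun k hk => hgh k (by simp [hk]))

-- main exchange lemma: the keyword-outer min-fold equals the line-outer scan
theorem exchange (keywords : List String) (lines : List String) :
    ∀ s : Int, 0 < s →
      keywords.foldl (fun best k => pvBetter best (pvFindLine k (lines.map PySem.Str.lower) s)) 0
        = pvAuxA keywords lines s := by
  induction lines with
  | nil =>
    intro s _
    exact foldl_better_all_zero _ _ _ (fun k _ => rfl)
  | cons l rest ih =>
    intro s hs
    simp only [List.map_cons, pvAuxA]
    by_cases hmatch : keywords.any (fun k => PySem.Str.isIn k (PySem.Str.lower l)) = true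
    · simp only [hmatch, if_true]
      obtain ⟨k0, hk0, hk0m⟩ := List.any_eq_true.mp hmatch
      refine foldl_better_hits _ _ _ _ hs (Or.inl rfl) ?_ ?_
      · intro k _
        simp only [pvFindLine]
        split
        · right; exact le_refl s
        · rcases pvFindLine_zero_or_ge k (rest.map PySem.Str.lower) (s + 1) with h | h
          · left; exact h
          · right; omega
      · refine Or.inr ⟨k0, hk0, ?_⟩
        simp only [pvFindLine, hk0m, if_true]
    · simp only [hmatch]
      have hnone : ∀ k ∈ keywords, PySem.Str.isIn k (PySem.Str.lower l) = false := by
        intro k hk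
        by_contra h
        exact hmatch (List.any_eq_true.mpr ⟨k, hk, by simpa using h⟩)
      rw [foldl_better_congr
            (fun k => pvFindLine k (PySem.Str.lower l :: rest.map PySem.Str.lower) s)
            (fun k => pvFindLine k (rest.map PySem.Str.lower) (s + 1))
            keywords 0
            (fun k hk => by simp only [pvFindLine, hnone k hk]; simp)]
      exact ih (s + 1) (by omega)

-- pvFindLine is 0 or lies in [s, s + length)
theorem pvFindLine_range (k : String) (lows : List String) :
    ∀ s : Int, pvFindLine k lows s = 0 ∨
      (s ≤ pvFindLine k lows s ∧ pvFindLine k lows s < s + lows.length) := by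
  induction lows with
  | nil => intro s; left; rfl
  | cons low rest ih =>
    intro s
    simp only [pvFindLine, List.length_cons]
    split
    · right; constructor
      · exact le_refl s
      · push_cast; omega
    · rcases ih (s + 1) with h | ⟨h1, h2⟩
      · left; exact h
      · right; push_cast at h2 ⊢; omega

-- the bounded scan in terms of the unbounded one
theorem pvFindLineUpto_eq (k : String) (lows : List String) :
    ∀ s u : Int, pvFindLineUpto k lows s u =
      if pvFindLine k lows s ≠ 0 ∧ pvFindLine k lows s < s + u
      then pvFindLine k lows s else 0 := by
  induction lows with
  | nil => intro s u; simp [pvFindLineUpto, pvFindLine]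
  | cons low rest ih =>
    intro s u
    simp only [pvFindLineUpto, pvFindLine]
    by_cases hu : u ≤ 0
    · simp only [hu, if_true]
      have h := pvFindLine_zero_or_ge k rest (s + 1)
      by_cases hin : PySem.Str.isIn k low = true
      · simp only [hin, if_true]; split <;> omega
      · simp only [hin, if_false]; rcases h with h | h <;> split <;> omega
    · simp only [hu, if_false]
      split
      · split <;> omega
      · rw [ih (s + 1) (u - 1)]
        have : s + 1 + (u - 1) = s + u := by ring
        rw [this]

-- replacing the bounded scan by the unbounded one does not change one pvBetter step
theorem pvBetter_upto (k : String) (lows : List String) (b : Int) (hb : 0 ≤ b) :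
    pvBetter b (pvFindLineUpto k lows 1 (if b = 0 then (lows.length : Int) else b - 1))
      = pvBetter b (pvFindLine k lows 1) := by
  rw [pvFindLineUpto_eq]
  rcases pvFindLine_range k lows 1 with h | ⟨h1, h2⟩
  · rw [h]; simp
  · by_cases hb0 : b = 0
    · simp only [hb0, if_true]
      rw [if_pos ⟨by omega, by omega⟩]
    · simp only [hb0, if_false]
      unfold pvBetter
      split
      · split <;> omega
      · split <;> omega

-- the whole fold with bounded scans equals the fold with unbounded scans
theorem foldl_upto_eq (lows : List String) (ks : List String) :
    ∀ b : Int, 0 ≤ b →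
      ks.foldl (fun best k =>
          pvBetter best (pvFindLineUpto k lows 1 (if best = 0 then (lows.length : Int) else best - 1))) b
        = ks.foldl (fun best k => pvBetter best (pvFindLine k lows 1)) b := by
  induction ks with
  | nil => intro b _; rfl
  | cons k ks ih =>
    intro b hb
    simp only [List.foldl_cons]
    rw [pvBetter_upto k lows b hb]
    refine ih (pvBetter b (pvFindLine k lows 1)) ?_
    rcases pvFindLine_zero_or_ge k lows 1 with h | h <;> unfold pvBetter <;> split <;> omega

-- ===== VERDICT (by name: the statement is the Claim_ definition above) =====
theorem find_first_keyword_line_py_spec : Claim_equal_find_first_keyword_line_py := by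
  intro lines keywords _
  unfold Spec_find_first_keyword_line_py find_first_keyword_line_py find_first_keyword_line_py_alt
  by_cases h : keywords = []
  · simp [h]
  · simp only [h, if_false]
    rw [foldl_upto_eq (lines.map PySem.Str.lower) keywords 0 (le_refl 0)]
    exact (exchange keywords lines 1 (by omega)).symm
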